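-- pv_equiv track=rewrite | github.com/Hyunsoo-Ryan-Lee/Programmers | 오픈채팅방, 더 맵게, 소수만들기.py | solution
-- ===== SOURCE A (Python) =====
-- import math
--
-- def solution(pr, sp):
--     n = len(pr)
--     remain = [] # [7,3,9]  [5,10,1,1,20,1]
--     for i in range(n):
--         p = math.ceil((100-pr[i])/sp[i])
--         remain.append(p)
--     ans = []
--     while remain:
--         cut = remain.pop(0)
--         count = 1
--         while len(remain) != 0 and cut >= remain[0]:
--             count += 1
--             remain.pop(0)
--         ans.append(count)
--     return ans
-- ===== SOURCE B (Python) =====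
-- def solution(pr, sp):
--     # Single fused pass: compute each period inline and group with running state,
--     # instead of building a remain list and repeatedly pop(0)-ing it.
--     ans = []
--     leader = None
--     count = 0
--     for pi, si in zip(pr, sp):
--         p = -((pi - 100) // si)  # exact ceil((100-pi)/si)
--         if leader is None:
--             leader, count = p, 1
--         elif p <= leader:
--             count += 1
--         else:
--             ans.append(count)
--             leader, count = p, 1
--     if count > 0:
--         ans.append(count)
--     return ans
-- ===== Notes on version B (the rewrite author's own statement) =====
-- stated objective: faster
-- what changed: Replaces the build-remain-array-then-nested-pop(0) loops with one linear scan over zip(pr,sp) that computes each period inline and maintains a running (leader,count) state, flushing counts as groups close.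
import Mathlib
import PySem

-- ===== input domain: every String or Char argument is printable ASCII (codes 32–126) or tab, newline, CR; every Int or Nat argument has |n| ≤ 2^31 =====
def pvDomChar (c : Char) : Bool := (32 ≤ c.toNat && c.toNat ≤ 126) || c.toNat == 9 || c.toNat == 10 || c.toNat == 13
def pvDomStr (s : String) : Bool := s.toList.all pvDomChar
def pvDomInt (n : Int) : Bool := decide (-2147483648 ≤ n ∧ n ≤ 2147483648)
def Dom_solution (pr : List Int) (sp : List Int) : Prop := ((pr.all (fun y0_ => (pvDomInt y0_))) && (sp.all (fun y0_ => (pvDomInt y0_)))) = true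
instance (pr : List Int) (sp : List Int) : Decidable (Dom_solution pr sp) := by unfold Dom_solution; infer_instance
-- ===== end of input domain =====

-- B fuses A's two phases (build remain list, then nested pop(0) grouping) into one
-- linear scan with running (leader, count) state: O(n) vs A's O(n^2) pop(0) shifting.
-- math.ceil((100-a)/b) is ported as the exact integer ceiling -((a-100)//b); this is
-- exact on Dom (|ints| ≤ 2^31 keeps the float division's ceiling exact).

-- ===== PORT A =====
-- inner while loop of A: consume prefix with cut ≥ head, incrementing count
def pvInner (cut : Int) (count : Int) : List Int → Int × List Int
  | [] => (count, [])
  | r :: rs => if cut ≥ r then pvInner cut (count + 1) rs else (count, r :: rs)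

theorem pvInner_len (cut count : Int) (xs : List Int) :
    (pvInner cut count xs).2.length ≤ xs.length := by
  induction xs generalizing count with
  | nil => simp [pvInner]
  | cons r rs ih =>
    simp only [pvInner]
    split
    · exact Nat.le_succ_of_le (ih _)
    · simp

-- outer while loop of A
def pvGroup : List Int → List Int
  | [] => []
  | cut :: rest =>
    let res := pvInner cut 1 rest
    res.1 :: pvGroup res.2
termination_by xs => xs.length
decreasing_by
  simpa using Nat.lt_succ_of_le (pvInner_len cut 1 rest)

-- first for-loop of A: build the remain list over range(n)
def pvRemain (pr : List Int) (sp : List Int) : List Int :=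
  (PySem.List.pyRange 0 (pr.length : Int) 1).foldl
    (fun acc i =>
      acc ++ [-(PySem.Int.floordiv (PySem.List.pyGetD pr i 0 - 100) (PySem.List.pyGetD sp i 0))])
    []

def solution (pr : List Int) (sp : List Int) : List Int :=
  pvGroup (pvRemain pr sp)

-- ===== PORT B =====
-- one fold step of B's fused loop; state = (ans, leader, count)
def pvStep (st : List Int × Option Int × Int) (p : Int) : List Int × Option Int × Int :=
  match st with
  | (ans, none, _) => (ans, some p, 1)
  | (ans, some l, c) => if p ≤ l then (ans, some l, c + 1) else (ans ++ [c], some p, 1)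

-- final flush of B: append the last group's count if one is open
def pvFinish (fin : List Int × Option Int × Int) : List Int :=
  if fin.2.2 > 0 then fin.1 ++ [fin.2.2] else fin.1

def solution_alt (pr : List Int) (sp : List Int) : List Int :=
  pvFinish ((pr.zip sp).foldl
    (fun st ab => pvStep st (-(PySem.Int.floordiv (ab.1 - 100) ab.2)))
    ([], none, 0))

-- ===== PRECONDITION & SPEC =====
-- Pre_ excludes exactly the inputs where Python A raises: IndexError when sp is
-- shorter than pr, ZeroDivisionError when some used sp entry is 0.
def Pre_solution (pr : List Int) (sp : List Int) : Prop :=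
  pr.length ≤ sp.length ∧ ∀ x ∈ sp.take pr.length, x ≠ 0
instance (pr : List Int) (sp : List Int) : Decidable (Pre_solution pr sp) := by
  unfold Pre_solution; infer_instance

def pvWitness_solution : List Int × List Int := ([30, 55, 10], [7, 9, 10])

def Spec_solution (pr : List Int) (sp : List Int) (out : List Int) : Prop := out = solution_alt pr sp
instance (pr : List Int) (sp : List Int) (out : List Int) : Decidable (Spec_solution pr sp out) := by unfold Spec_solution; infer_instance

-- ===== CLAIM (what is proved, stated in full; the proofs are below) =====
def Claim_equal_solution : Prop := ∀ (pr : List Int) (sp : List Int), Dom_solution pr sp → Pre_solution pr sp → Spec_solution pr sp (solution pr sp)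

-- ===== LEMMAS AND PROOFS =====

-- the remain list A builds equals the per-pair map over zip pr sp
theorem remain_eq_map (pr sp : List Int) (h : pr.length ≤ sp.length) :
    pvRemain pr sp
    = (pr.zip sp).map (fun ab => -(PySem.Int.floordiv (ab.1 - 100) ab.2)) := by
  unfold pvRemain
  rw [PySem.List.foldl_append_singleton_eq_map, PySem.List.pyRange_zero_nat, List.map_map]
  apply List.ext_getElem
  · simp [List.length_zip]; omega
  · intro k hk1 hk2
    have hk : k < pr.length := by simpa using hk1
    simp only [List.nil_append, List.getElem_map, List.getElem_range,
      Function.comp_apply, PySem.List.pyGetD_natCast, List.getElem_zip]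
    rw [List.getD_eq_getElem _ _ hk, List.getD_eq_getElem _ _ (lt_of_lt_of_le hk h)]

-- B's fold from a live (leader, count) state produces A's inner/outer grouping
theorem fold_inner (xs : List Int) : ∀ (ans : List Int) (l c : Int), 1 ≤ c →
    pvFinish (xs.foldl pvStep (ans, some l, c))
    = ans ++ (pvInner l c xs).1 :: pvGroup (pvInner l c xs).2 := by
  induction xs with
  | nil =>
    intro ans l c hc
    simp only [List.foldl_nil, pvInner, pvFinish]
    rw [if_pos (by omega)]
    simp [pvGroup]
  | cons p rest ih =>
    intro ans l c hc
    by_cases hpl : l ≥ p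
    · have h1 : p ≤ l := hpl
      simp only [List.foldl_cons, pvStep, if_pos h1, pvInner]
      exact ih ans l (c + 1) (by omega)
    · have h1 : ¬ p ≤ l := hpl
      simp only [List.foldl_cons, pvStep, if_neg h1, pvInner]
      rw [ih (ans ++ [c]) p 1 le_rfl, List.append_assoc, pvGroup]
      simp

-- ===== VERDICT (by name: the statement is the Claim_ definition above) =====
theorem solution_spec : Claim_equal_solution := by
  intro pr sp _ hpre
  unfold Spec_solution solution solution_alt
  rw [remain_eq_map pr sp hpre.1, ← List.foldl_map]
  cases h : (pr.zip sp).map (fun ab => -(PySem.Int.floordiv (ab.1 - 100) ab.2)) with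
  | nil => simp [pvGroup, pvFinish]
  | cons p rest =>
    simp only [List.foldl_cons, pvStep, pvGroup]
    exact (fold_inner rest [] p 1 le_rfl).symm
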